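-- pv_equiv track=rewrite | github.com/eunhyekim-grace/Coding-Test-Preparation | 프로그래머스/lv1/42840. 모의고사/모의고사.py | solution
-- ===== SOURCE A (Python) =====
-- def make_one(leng): #1번 생성
--     temp = [1,2,3,4,5]
--     if leng > len(temp):
--         temp = temp * int((leng/len(temp))+1)
--     return temp[:leng]
--
-- def make_two(leng): #2번 생성
--     temp = [2,1,2,3,2,4,2,5]
--     if leng > len(temp):
--         temp = temp * int((leng/len(temp)) +1 )
--     return temp[:leng]
--
-- def make_three(leng): #3번 생성
--     temp = [3,3,1,1,2,2,4,4,5,5]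
--     if leng > len(temp):
--         temp = temp * int((leng/len(temp))+1)
--     return temp[:leng]
--
-- def solution(answers):
--     leng = len(answers)
--
--     one = make_one(leng)
--     two = make_two(leng)
--     three = make_three(leng)
--
--     cnt1 = 0; cnt2 = 0; cnt3 = 0
--     for a,b,c,ans in zip(one,two, three, answers): #비교 해서 점수 할당
--         if a == ans:
--             cnt1 +=1
--         if b == ans:
--             cnt2 += 1
--         if c == ans:
--             cnt3 += 1
--
--     cnt = [cnt1,cnt2,cnt3]
--     answer = []
--     for idx, c in enumerate(cnt): #제일 많이 맞춘 사람만 answer에 넣기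
--         if c == max(cnt):
--             answer.append(idx+1)
--
--     return answer
-- ===== SOURCE B (Python) =====
-- def solution(answers):
--     # Bucket answers once into a histogram keyed by (position mod 40, value);
--     # 40 = lcm(5, 8, 10), the common period of the three guessing patterns,
--     # so each pattern's score is a weighted sum over the <=200 histogram keys.
--     freq = {}
--     for i, a in enumerate(answers):
--         k = (i % 40, a)
--         freq[k] = freq.get(k, 0) + 1
--     pats = ([1, 2, 3, 4, 5], [2, 1, 2, 3, 2, 4, 2, 5], [3, 3, 1, 1, 2, 2, 4, 4, 5, 5])
--     counts = [sum(n for (r, v), n in freq.items() if v == p[r % len(p)]) for p in pats]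
--     best = max(counts)
--     return [j + 1 for j, c in enumerate(counts) if c == best]
-- ===== Notes on version B (the rewrite author's own statement) =====
-- stated objective: alternative
-- what changed: B replaces the per-element comparison against three materialized pattern lists by a two-stage aggregation: one pass buckets answers into a histogram keyed by (i % 40, value) (40 = lcm of the pattern periods), then each pattern's score is a weighted sum over the at most 200 histogram entries; no per-element pattern comparison and no O(n) pattern lists exist.
import Mathlib
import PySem

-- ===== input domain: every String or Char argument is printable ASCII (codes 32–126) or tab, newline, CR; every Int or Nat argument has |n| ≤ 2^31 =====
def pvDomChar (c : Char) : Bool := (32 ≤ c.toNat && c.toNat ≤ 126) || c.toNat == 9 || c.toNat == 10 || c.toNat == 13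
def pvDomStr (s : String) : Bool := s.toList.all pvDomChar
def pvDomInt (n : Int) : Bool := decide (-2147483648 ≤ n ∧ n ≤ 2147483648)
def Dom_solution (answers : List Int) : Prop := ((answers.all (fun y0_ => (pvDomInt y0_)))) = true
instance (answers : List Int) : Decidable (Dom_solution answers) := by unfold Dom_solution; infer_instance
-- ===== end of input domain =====

-- B replaces the per-element pattern comparisons by a two-stage aggregation: one pass buckets
-- answers into a histogram keyed by (i % 40, value) (40 = lcm of the pattern periods), then each
-- pattern's score is a weighted sum over the histogram entries (objective: alternative).

-- ===== PORT A =====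
-- temp * int((leng/len(temp))+1): leng is a list length (nonnegative, < 2^53), so
-- int(leng/len + 1) = leng // len + 1 exactly; ported as floordiv.
def make_one (leng : Int) : List Int :=
  let temp : List Int := [1,2,3,4,5]
  let temp := if leng > (temp.length : Int)
    then PySem.List.pyRepeat temp (PySem.Int.floordiv leng (temp.length : Int) + 1)
    else temp
  PySem.List.slice temp none (some leng)

def make_two (leng : Int) : List Int :=
  let temp : List Int := [2,1,2,3,2,4,2,5]
  let temp := if leng > (temp.length : Int)
    then PySem.List.pyRepeat temp (PySem.Int.floordiv leng (temp.length : Int) + 1)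
    else temp
  PySem.List.slice temp none (some leng)

def make_three (leng : Int) : List Int :=
  let temp : List Int := [3,3,1,1,2,2,4,4,5,5]
  let temp := if leng > (temp.length : Int)
    then PySem.List.pyRepeat temp (PySem.Int.floordiv leng (temp.length : Int) + 1)
    else temp
  PySem.List.slice temp none (some leng)

-- zip(one, two, three, answers)
def zip4 : List Int → List Int → List Int → List Int → List (Int × Int × Int × Int)
  | a :: as, b :: bs, c :: cs, d :: ds => (a, b, c, d) :: zip4 as bs cs ds
  | _, _, _, _ => []

def solution (answers : List Int) : List Int :=
  let leng : Int := answers.length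
  let one := make_one leng
  let two := make_two leng
  let three := make_three leng
  let cnts : Int × Int × Int :=
    (zip4 one two three answers).foldl
      (fun s q =>
        let s1 := if q.1 == q.2.2.2 then s.1 + 1 else s.1
        let s2 := if q.2.1 == q.2.2.2 then s.2.1 + 1 else s.2.1
        let s3 := if q.2.2.1 == q.2.2.2 then s.2.2 + 1 else s.2.2
        (s1, s2, s3)) (0, 0, 0)
  let cnt : List Int := [cnts.1, cnts.2.1, cnts.2.2]
  -- max(cnt): cnt is a nonempty 3-element literal, so max? is never none
  (PySem.List.enumerate cnt 0).foldl
    (fun answer ic =>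
      if ic.2 == (PySem.List.max? cnt (fun x => x)).getD 0 then answer ++ [ic.1 + 1] else answer) []

-- ===== PORT B =====
def pvPatterns : List (List Int) := [[1,2,3,4,5], [2,1,2,3,2,4,2,5], [3,3,1,1,2,2,4,4,5,5]]

-- freq[k] = freq.get(k, 0) + 1 with k = (i % 40, a), for i, a in enumerate(answers)
def pvHist (answers : List Int) : PySem.Dict (Int × Int) Int :=
  (PySem.List.enumerate answers 0).foldl
    (fun d ia =>
      let k : Int × Int := (PySem.Int.mod ia.1 40, ia.2)
      d.insert k (d.getD k 0 + 1)) PySem.Dict.empty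

-- sum(n for (r, v), n in freq.items() if v == p[r % len(p)]); r % len(p) is always in range
def pvScore (freq : PySem.Dict (Int × Int) Int) (p : List Int) : Int :=
  freq.items.foldl
    (fun s kv =>
      s + (if kv.1.2 == PySem.List.pyGetD p (PySem.Int.mod kv.1.1 (p.length : Int)) 0
           then kv.2 else 0)) 0

def solution_alt (answers : List Int) : List Int :=
  let freq := pvHist answers
  let counts : List Int := pvPatterns.map (fun p => pvScore freq p)
  -- max(counts): counts is a nonempty 3-element list, so max? is never none
  let best : Int := (PySem.List.max? counts (fun x => x)).getD 0
  (PySem.List.enumerate counts 0).foldl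
    (fun acc jc => if jc.2 == best then acc ++ [jc.1 + 1] else acc) []

-- ===== PRECONDITION & SPEC =====
def Spec_solution (answers : List Int) (out : List Int) : Prop := out = solution_alt answers
instance (answers : List Int) (out : List Int) : Decidable (Spec_solution answers out) := by unfold Spec_solution; infer_instance

-- ===== CLAIM (what is proved, stated in full; the proofs are below) =====
def Claim_equal_solution : Prop := ∀ (answers : List Int), Dom_solution answers → Spec_solution answers (solution answers)

-- ===== LEMMAS AND PROOFS =====

-- first n entries of the cycle of p, read starting at offset s
def cyc (p : List Int) (s n : Nat) : List Int :=
  (List.range n).map (fun i => p.getD ((s + i) % p.length) 0)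

-- recursive characterization of the per-pattern match count, from offset s
def cntFrom (p : List Int) : Nat → List Int → Int
  | _, [] => 0
  | s, a :: t => (if a == p.getD (s % p.length) 0 then 1 else 0) + cntFrom p (s + 1) t

lemma cyc_succ (p : List Int) (s n : Nat) :
    cyc p s (n + 1) = p.getD (s % p.length) 0 :: cyc p (s + 1) n := by
  unfold cyc
  rw [List.range_succ_eq_map, List.map_cons]
  simp only [Nat.add_zero, List.map_map, Function.comp_def]
  congr 1
  apply List.map_congr_left
  intro i _
  have h : s + (i + 1) = s + 1 + i := by omega
  rw [h]

lemma getElem?_flatten_replicate (p : List Int) (k i : Nat)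
    (h : i < k * p.length) :
    (List.replicate k p).flatten[i]? = p[i % p.length]? := by
  induction k generalizing i with
  | zero => omega
  | succ k ih =>
    rw [List.replicate_succ, List.flatten_cons]
    by_cases hi : i < p.length
    · rw [List.getElem?_append_left hi, Nat.mod_eq_of_lt hi]
    · rw [List.getElem?_append_right (by omega)]
      rw [Nat.succ_mul] at h
      rw [ih (i - p.length) (by omega)]
      congr 1
      exact (Nat.mod_eq_sub_mod (by omega)).symm

lemma make_eq_cyc (p : List Int) (hp : 0 < p.length) (n : Nat) :
    PySem.List.slice
      (if (n : Int) > (p.length : Int)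
        then PySem.List.pyRepeat p (PySem.Int.floordiv (n : Int) (p.length : Int) + 1)
        else p) none (some (n : Int)) = cyc p 0 n := by
  rw [PySem.List.slice_to_natCast]
  apply List.ext_getElem?
  intro i
  by_cases hin : i < n
  · have hcyc : (cyc p 0 n)[i]? = p[i % p.length]? := by
      unfold cyc
      rw [List.getElem?_map, List.getElem?_range hin]
      simp only [Option.map_some, Nat.zero_add]
      rw [List.getD_eq_getElem p 0 (Nat.mod_lt i hp), List.getElem?_eq_getElem (Nat.mod_lt i hp)]
    rw [List.getElem?_take_of_lt hin, hcyc]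
    split
    · next hgt =>
      have hcast : PySem.Int.floordiv (n : Int) (p.length : Int) + 1
          = ((n / p.length + 1 : Nat) : Int) := by
        rw [PySem.Int.floordiv_natCast]; push_cast; ring
      rw [PySem.List.pyRepeat, hcast]
      have hlt : i < (n / p.length + 1) * p.length := by
        have h1 := Nat.div_add_mod n p.length
        have h2 := Nat.mod_lt n hp
        nlinarith
      rw [Int.toNat_natCast, getElem?_flatten_replicate p _ i hlt]
    · next hle =>
      have hnle : n ≤ p.length := by exact_mod_cast not_lt.mp (by simpa using hle)
      rw [Nat.mod_eq_of_lt (by omega)]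
  · rw [List.getElem?_eq_none (by simp; omega), List.getElem?_eq_none (by simp [cyc]; omega)]

-- one comparison-and-increment step of A's loop, against one 0/1 term of cntFrom
lemma step_count (x a c r : Int) :
    (if x == a then c + 1 else c) + r = c + ((if a == x then 1 else 0) + r) := by
  by_cases h : x = a
  · subst h; simp; ring
  · have h' : a ≠ x := fun hh => h hh.symm
    simp [h, h']

-- the A-side zip4 fold over the three cyclic prefixes computes the three cntFrom counts
lemma foldA_eq (ans : List Int) (s : Nat) (c1 c2 c3 : Int) :
    (zip4 (cyc [1,2,3,4,5] s ans.length) (cyc [2,1,2,3,2,4,2,5] s ans.length)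
          (cyc [3,3,1,1,2,2,4,4,5,5] s ans.length) ans).foldl
      (fun s q =>
        let s1 := if q.1 == q.2.2.2 then s.1 + 1 else s.1
        let s2 := if q.2.1 == q.2.2.2 then s.2.1 + 1 else s.2.1
        let s3 := if q.2.2.1 == q.2.2.2 then s.2.2 + 1 else s.2.2
        (s1, s2, s3)) (c1, c2, c3)
    = (c1 + cntFrom [1,2,3,4,5] s ans, c2 + cntFrom [2,1,2,3,2,4,2,5] s ans,
       c3 + cntFrom [3,3,1,1,2,2,4,4,5,5] s ans) := by
  induction ans generalizing s c1 c2 c3 with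
  | nil => simp [cyc, zip4, cntFrom]
  | cons a t ih =>
    rw [List.length_cons, cyc_succ, cyc_succ, cyc_succ]
    rw [show zip4 (([1,2,3,4,5].getD (s % ([1,2,3,4,5] : List Int).length) 0) :: cyc [1,2,3,4,5] (s+1) t.length)
          (([2,1,2,3,2,4,2,5].getD (s % ([2,1,2,3,2,4,2,5] : List Int).length) 0) :: cyc [2,1,2,3,2,4,2,5] (s+1) t.length)
          (([3,3,1,1,2,2,4,4,5,5].getD (s % ([3,3,1,1,2,2,4,4,5,5] : List Int).length) 0) :: cyc [3,3,1,1,2,2,4,4,5,5] (s+1) t.length)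
          (a :: t)
        = ([1,2,3,4,5].getD (s % ([1,2,3,4,5] : List Int).length) 0,
           [2,1,2,3,2,4,2,5].getD (s % ([2,1,2,3,2,4,2,5] : List Int).length) 0,
           [3,3,1,1,2,2,4,4,5,5].getD (s % ([3,3,1,1,2,2,4,4,5,5] : List Int).length) 0, a)
          :: zip4 (cyc [1,2,3,4,5] (s+1) t.length) (cyc [2,1,2,3,2,4,2,5] (s+1) t.length)
               (cyc [3,3,1,1,2,2,4,4,5,5] (s+1) t.length) t from rfl]
    rw [List.foldl_cons]
    dsimp only
    rw [ih]
    show _ = (c1 + cntFrom [1,2,3,4,5] s (a :: t), c2 + cntFrom [2,1,2,3,2,4,2,5] s (a :: t),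
              c3 + cntFrom [3,3,1,1,2,2,4,4,5,5] s (a :: t))
    simp only [cntFrom, Prod.mk.injEq]
    exact ⟨step_count _ _ _ _, step_count _ _ _ _, step_count _ _ _ _⟩

-- the bucketing key of B
def pvKey (ia : Int × Int) : Int × Int := (PySem.Int.mod ia.1 40, ia.2)

-- B's histogram is the counter of the key-mapped enumeration
lemma hist_eq_counter (answers : List Int) :
    pvHist answers = PySem.Dict.counter ((PySem.List.enumerate answers 0).map pvKey) := by
  rw [← PySem.Dict.foldl_insert_getD_add_one_eq_counter, List.foldl_map]
  rfl

-- selective sum over a duplicate-free key list covering L counts L's matches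
lemma sum_sel_single (q : Int × Int → Bool) (a : Int × Int) :
    ∀ ks : List (Int × Int), ks.Nodup → a ∈ ks →
      (ks.map (fun k => if q k then (if k == a then (1 : Int) else 0) else 0)).sum
        = (if q a then (1 : Int) else 0) := by
  intro ks
  induction ks with
  | nil => intro _ h; cases h
  | cons b t ih =>
    intro hnd hmem
    rcases List.mem_cons.mp hmem with hba | hmem'
    · subst hba
      have hnot : a ∉ t := (List.nodup_cons.mp hnd).1
      have hz : (t.map (fun k => if q k then (if k == a then (1 : Int) else 0) else 0)).sum = 0 := by
        apply List.sum_eq_zero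
        intro x hx
        rcases List.mem_map.mp hx with ⟨k, hk, rfl⟩
        have hne : (k == a) = false := by
          simp only [beq_eq_false_iff_ne]
          intro hka; exact hnot (hka ▸ hk)
        simp [hne]
      rw [List.map_cons, List.sum_cons, hz]
      simp
    · have hne : (b == a) = false := by
        simp only [beq_eq_false_iff_ne]
        intro hba; exact (List.nodup_cons.mp hnd).1 (hba ▸ hmem')
      rw [List.map_cons, List.sum_cons, ih (List.nodup_cons.mp hnd).2 hmem']
      simp [hne]

lemma sum_sel_count (q : Int × Int → Bool) (ks : List (Int × Int)) (hnd : ks.Nodup) :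
    ∀ L : List (Int × Int), (∀ x ∈ L, x ∈ ks) →
      (ks.map (fun k => if q k then (L.count k : Int) else 0)).sum = (L.countP q : Int) := by
  intro L
  induction L with
  | nil => intro _; simp
  | cons a t ih =>
    intro hcov
    have ha : a ∈ ks := hcov a (List.mem_cons_self)
    have hsplit :
        (ks.map (fun k => if q k then ((a :: t).count k : Int) else 0)).sum
          = (ks.map (fun k => if q k then (t.count k : Int) else 0)).sum
            + (ks.map (fun k => if q k then (if k == a then (1 : Int) else 0) else 0)).sum := by
      rw [← List.sum_map_add]
      apply congrArg List.sum
      apply List.map_congr_left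
      intro k _
      by_cases hq : q k
      · simp only [hq, if_true, List.count_cons]
        push_cast
        by_cases h : a = k
        · simp [h]
        · simp [h, show k ≠ a from fun hh => h hh.symm]
      · simp [hq]
    rw [hsplit, ih (fun x hx => hcov x (List.mem_cons_of_mem a hx)),
        sum_sel_single q a ks hnd ha, List.countP_cons]
    by_cases hq : q a
    · simp [hq]
    · simp [hq]

-- the per-pattern match predicate on an enumerated (index, answer) pair, after bucketing by i % 40
def pvPred (p : List Int) (ia : Int × Int) : Bool :=
  ia.2 == PySem.List.pyGetD p (PySem.Int.mod (pvKey ia).1 (p.length : Int)) 0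

-- B's score of pattern p is the selective count over the enumeration
lemma score_eq_countP (answers : List Int) (p : List Int) :
    pvScore (pvHist answers) p
      = ((((PySem.List.enumerate answers 0).map pvKey).countP
            (fun k => k.2 == PySem.List.pyGetD p (PySem.Int.mod k.1 (p.length : Int)) 0) : Nat) : Int) := by
  set L := (PySem.List.enumerate answers 0).map pvKey with hL
  set q : Int × Int → Bool :=
    fun k => k.2 == PySem.List.pyGetD p (PySem.Int.mod k.1 (p.length : Int)) 0 with hq
  rw [pvScore, hist_eq_counter, PySem.Dict.items_counter]
  rw [PySem.List.foldl_add (g := fun kv : (Int × Int) × Int => if q kv.1 then kv.2 else 0)]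
  rw [List.map_map]
  have hmc : ((PySem.Set.ofList L).map
        ((fun kv : (Int × Int) × Int => if q kv.1 then kv.2 else 0)
          ∘ fun k => (k, (L.count k : Int))))
      = (PySem.Set.ofList L).map (fun k => if q k then (L.count k : Int) else 0) := rfl
  rw [hmc, sum_sel_count q (PySem.Set.ofList L) (PySem.Set.nodup_ofList L) L
        (fun x hx => (PySem.Set.mem_ofList L x).mpr hx)]
  simp

-- countP of the bucketed predicate equals cntFrom, since each pattern period divides 40
lemma countP_eq_cntFrom (p : List Int) (hdvd : p.length ∣ 40)
    (ans : List Int) : ∀ s : Nat,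
    (((PySem.List.enumerate ans ((s : Nat) : Int)).countP
        (fun ia => pvPred p ia) : Nat) : Int) = cntFrom p s ans := by
  induction ans with
  | nil => intro s; simp [PySem.List.enumerate, cntFrom]
  | cons a t ih =>
    intro s
    rw [PySem.List.enumerate_cons, List.countP_cons]
    have hstep : pvPred p ((s : Int), a) = (a == p.getD (s % p.length) 0) := by
      unfold pvPred pvKey
      have h40 : PySem.Int.mod ((s : Nat) : Int) 40 = (((s % 40 : Nat) : Nat) : Int) := by
        exact_mod_cast PySem.Int.mod_natCast s 40
      rw [h40, PySem.Int.mod_natCast, Nat.mod_mod_of_dvd s hdvd, PySem.List.pyGetD_natCast]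
    push_cast
    have ih' := ih (s + 1)
    rw [show (((s + 1 : Nat)) : Int) = (s : Int) + 1 from by push_cast; ring] at ih'
    rw [ih', hstep]
    show _ = cntFrom p s (a :: t)
    simp only [cntFrom]
    by_cases h : a == p.getD (s % p.length) 0 <;> simp only [h, if_true] <;> ring

-- B's score of pattern p is exactly the cyclic match count
lemma score_eq_cntFrom (answers p : List Int) (hdvd : p.length ∣ 40) :
    pvScore (pvHist answers) p = cntFrom p 0 answers := by
  rw [score_eq_countP, List.countP_map]
  have h0 : (0 : Int) = ((0 : Nat) : Int) := rfl
  rw [h0, ← countP_eq_cntFrom p hdvd answers 0]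
  rfl

-- ===== VERDICT (by name: the statement is the Claim_ definition above) =====
theorem solution_spec : Claim_equal_solution := by
  intro answers _
  unfold Spec_solution solution solution_alt pvPatterns
  simp only [List.map_cons, List.map_nil,
      score_eq_cntFrom answers [1,2,3,4,5] (by decide),
      score_eq_cntFrom answers [2,1,2,3,2,4,2,5] (by decide),
      score_eq_cntFrom answers [3,3,1,1,2,2,4,4,5,5] (by decide)]
  unfold make_one make_two make_three
  rw [make_eq_cyc [1,2,3,4,5] (by decide) answers.length,
      make_eq_cyc [2,1,2,3,2,4,2,5] (by decide) answers.length,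
      make_eq_cyc [3,3,1,1,2,2,4,4,5,5] (by decide) answers.length,
      foldA_eq answers 0 0 0 0]
  norm_num
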